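-- pv_equiv track=rewrite | github.com/charlesnoah344/Noah_Loic-Lassey_Lincoln-Quarto-PI_2C | projet_quarto.py | piece_danger_score
-- ===== SOURCE A (Python) =====
-- def get_available_positions(board):
--     """Retourne les positions disponibles triées par importance (centre > coins > bords)"""
--     positions = [i for i, p in enumerate(board) if p is None]
--     position_values = [3 if i in [5, 6, 9, 10] else 2 if i in [0, 3, 12, 15] else 1 for i in range(16)]
--     positions.sort(key=lambda x: -position_values[x])#on trie selon la valeur négative (pour trier du plus grand au plus petit).
--     return positions
--
-- def piece_danger_score(piece, board):
--     """Évalue à quel point une pièce est dangereuse pour l'adversaire"""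
--     score = 0
--     for pos in get_available_positions(board):
--         new_board = board.copy()
--         new_board[pos] = piece
--         if check_winner(new_board):
--             score += 100  # Pièce qui peut faire gagner immédiatement
--     return score
--
-- def has_common_attribute(pieces):
--     """Vérifie si les pièces ont un attribut commun"""
--     if not pieces or None in pieces:
--         return False
--     for i in range(4):  # Vérifie chaque attribut
--         if len(set(p[i] for p in pieces)) == 1:
--             return True
--     return False
--
-- def check_winner(board):
--     """Vérifie s'il y a un gagnant sur le plateau"""
--     # Convertir en grille 4x4
--     grid = [board[i*4:(i+1)*4] for i in range(4)]
--
--     # Vérifier lignes et colonnes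
--     for i in range(4):
--         row = grid[i]
--         if None not in row and has_common_attribute(row):
--             return True
--         column = [grid[j][i] for j in range(4)]
--         if None not in column and has_common_attribute(column):
--             return True
--
--     # Vérifier diagonales
--     diag1 = [grid[i][i] for i in range(4)]
--     diag2 = [grid[i][3-i] for i in range(4)]
--     if (None not in diag1 and has_common_attribute(diag1)) or \
--        (None not in diag2 and has_common_attribute(diag2)):
--         return True
--
--     return False
-- ===== SOURCE B (Python) =====
-- # Line-scan reimplementation: instead of simulating a placement in every empty
-- # cell and re-checking the whole board, look at the 10 winning lines directly.
-- WIN_LINES = [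
--     [0, 1, 2, 3], [4, 5, 6, 7], [8, 9, 10, 11], [12, 13, 14, 15],   # rows
--     [0, 4, 8, 12], [1, 5, 9, 13], [2, 6, 10, 14], [3, 7, 11, 15],   # columns
--     [0, 5, 10, 15], [3, 6, 9, 12],                                  # diagonals
-- ]
--
--
-- def _shares_attribute(ref, cells):
--     """True iff some attribute index 0..3 has the same value in ref and every cell."""
--     return any(all(c[i] == ref[i] for c in cells) for i in range(4))
--
--
-- def piece_danger_score(piece, board):
--     empties = [i for i, p in enumerate(board) if p is None]
--     if not empties:
--         return 0  # nowhere to place a piece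
--     # A board that already contains a winning line stays winning after any placement.
--     if any(all(board[i] is not None for i in line)
--            and _shares_attribute(board[line[0]], [board[i] for i in line])
--            for line in WIN_LINES):
--         return 100 * len(empties)
--     winning = set()
--     for line in WIN_LINES:
--         holes = [i for i in line if board[i] is None]
--         if len(holes) == 1:
--             filled = [board[i] for i in line if board[i] is not None]
--             if _shares_attribute(piece, filled):
--                 winning.add(holes[0])
--     return 100 * len(winning)
-- ===== Notes on version B (the rewrite author's own statement) =====
-- stated objective: faster
-- what changed: Instead of simulating a placement in every empty cell and re-running the full board winner check each time, B scans the 10 winning lines once: no empty cell scores 0, an already-winning board scores every empty cell, otherwise a line with exactly one hole whose pieces share an attribute with the piece marks that hole, and distinct marked holes are counted.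
-- outside the precondition, e.g. on piece_danger_score((0, 0, 0, 0), [(0, 0, 0, 0), None]): A returns 100, B raises IndexError
import Mathlib
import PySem

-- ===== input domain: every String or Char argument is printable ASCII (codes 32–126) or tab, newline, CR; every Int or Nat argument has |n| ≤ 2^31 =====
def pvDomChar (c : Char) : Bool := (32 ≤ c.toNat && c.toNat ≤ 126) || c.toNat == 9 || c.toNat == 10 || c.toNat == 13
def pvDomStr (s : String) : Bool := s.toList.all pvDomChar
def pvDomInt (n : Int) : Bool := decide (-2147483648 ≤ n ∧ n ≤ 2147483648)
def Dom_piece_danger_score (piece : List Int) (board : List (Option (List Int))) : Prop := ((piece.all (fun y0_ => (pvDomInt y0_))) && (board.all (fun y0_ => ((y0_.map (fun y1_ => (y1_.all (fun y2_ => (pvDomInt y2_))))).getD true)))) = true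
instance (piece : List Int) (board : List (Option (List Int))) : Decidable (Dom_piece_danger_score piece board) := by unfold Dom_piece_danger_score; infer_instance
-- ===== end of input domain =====

-- B replaces A's place-and-recheck simulation (each empty cell gets a board copy and a
-- full winner scan) by a single scan of the 10 winning lines (fewer line checks, no board copies).

-- ===== PORT A =====
-- get_available_positions: empties of the board, sorted by place value (stable sort = PySem.List.sorted).
-- The sort key position_values[x] is exact under Pre_ (every empty index is < 16 = len(position_values)).
def getAvailablePositions (board : List (Option (List Int))) : List Int :=
  let positions :=
    ((PySem.List.enumerate board).filter (fun ip => ip.2 == none)).map (fun ip => ip.1)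
  let positionValues : List Int :=
    (List.range 16).map (fun i =>
      if i ∈ ([5, 6, 9, 10] : List Nat) then (3 : Int)
      else if i ∈ ([0, 3, 12, 15] : List Nat) then 2 else 1)
  PySem.List.sorted positions (fun x => -(PySem.List.pyGetD positionValues x 0)) false
-- has_common_attribute: p[i] ported as pyGet? (Option-valued); exact under Pre_ (pieces have ≥ 4 attributes)
def hasCommonAttribute (pieces : List (Option (List Int))) : Bool :=
  if pieces = [] ∨ pieces.contains none then false
  else (List.range 4).any (fun i =>
    (PySem.Set.ofList (pieces.map (fun p => PySem.List.pyGet? (p.getD []) (i : Int)))).length == 1)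
-- check_winner; grid[i] / grid[j][i] ported with getD-defaults that are exact under Pre_ (16-cell board)
def checkWinner (board : List (Option (List Int))) : Bool :=
  let grid := (List.range 4).map (fun i =>
    PySem.List.slice board (some ((i : Int) * 4)) (some (((i : Int) + 1) * 4)))
  let rowcols := (List.range 4).any (fun i =>
    let row := grid.getD i []
    let column := (List.range 4).map (fun j => (PySem.List.pyGet? (grid.getD j []) (i : Int)).getD none)
    (!(row.contains none) && hasCommonAttribute row)
      || (!(column.contains none) && hasCommonAttribute column))
  let diag1 := (List.range 4).map (fun i => (PySem.List.pyGet? (grid.getD i []) (i : Int)).getD none)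
  let diag2 := (List.range 4).map (fun i => (PySem.List.pyGet? (grid.getD i []) ((3 : Int) - (i : Int))).getD none)
  rowcols || ((!(diag1.contains none) && hasCommonAttribute diag1)
      || (!(diag2.contains none) && hasCommonAttribute diag2))
-- new_board[pos] = piece is pySetD (exact: pos comes from enumerate, hence in range)
def piece_danger_score (piece : List Int) (board : List (Option (List Int))) : Int :=
  (getAvailablePositions board).foldl
    (fun score pos =>
      let newBoard := PySem.List.pySetD board pos (some piece)
      if checkWinner newBoard then score + 100 else score) 0

-- ===== PORT B =====
def pvWinLines : List (List Nat) :=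
  [[0, 1, 2, 3], [4, 5, 6, 7], [8, 9, 10, 11], [12, 13, 14, 15],
   [0, 4, 8, 12], [1, 5, 9, 13], [2, 6, 10, 14], [3, 7, 11, 15],
   [0, 5, 10, 15], [3, 6, 9, 12]]
-- board[i]; exact under Pre_ (line indices are < 16 = board length)
def pvCell (board : List (Option (List Int))) (i : Nat) : Option (List Int) :=
  (board[i]?).getD none
-- c[i] == ref[i] ported as pyGet? equality; exact under Pre_ (pieces have ≥ 4 attributes)
def pvSharesAttribute (ref : List Int) (cells : List (List Int)) : Bool :=
  (List.range 4).any (fun i =>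
    cells.all (fun c => PySem.List.pyGet? c (i : Int) == PySem.List.pyGet? ref (i : Int)))
def piece_danger_score_alt (piece : List Int) (board : List (Option (List Int))) : Int :=
  let empties := ((PySem.List.enumerate board).filter (fun ip => ip.2 == none)).map (fun ip => ip.1)
  if empties.isEmpty then 0
  else if pvWinLines.any (fun line =>
        line.all (fun i => !(pvCell board i == none))
          && pvSharesAttribute ((pvCell board (line.headD 0)).getD [])
               (line.map (fun i => (pvCell board i).getD [])))
  then 100 * (empties.length : Int)
  else
    let winning : PySem.Set Nat := pvWinLines.foldl
      (fun s line =>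
        let holes := line.filter (fun i => pvCell board i == none)
        if holes.length == 1 then
          let filled := (line.filter (fun i => !(pvCell board i == none))).map
            (fun i => (pvCell board i).getD [])
          if pvSharesAttribute piece filled then PySem.Set.add s (holes.headD 0) else s
        else s)
      PySem.Set.empty
    100 * (winning.length : Int)

-- ===== PRECONDITION & SPEC =====
-- Pre_ admits boards with no empty cell (A returns 0 there without inspecting any line,
-- whatever the board's length or its pieces) and otherwise the Quarto domain: a 16-cell board
-- whose pieces (and the piece in hand) have at least 4 attributes.  Outside it A generally
-- raises IndexError (rows/columns or the 16-entry position-value table run out, or p[i] on a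
-- short piece); A still returns on some excluded degenerate inputs (e.g. a 2-cell board whose
-- single placement completes the first row early) — see claim cites.
def Pre_piece_danger_score (piece : List Int) (board : List (Option (List Int))) : Prop :=
  board.contains none = false ∨
    (board.length = 16 ∧ 4 ≤ piece.length ∧
      board.all (fun c => c.all (fun p => 4 ≤ p.length)) = true)
instance (piece : List Int) (board : List (Option (List Int))) : Decidable (Pre_piece_danger_score piece board) := by unfold Pre_piece_danger_score; infer_instance
def pvWitness_piece_danger_score : List Int × List (Option (List Int)) :=
  ([0, 1, 2, 3], [none, none, none, none, none, none, none, none,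
                  none, none, none, none, none, none, none, none])
def Spec_piece_danger_score (piece : List Int) (board : List (Option (List Int))) (out : Int) : Prop := out = piece_danger_score_alt piece board
instance (piece : List Int) (board : List (Option (List Int))) (out : Int) : Decidable (Spec_piece_danger_score piece board out) := by unfold Spec_piece_danger_score; infer_instance

-- ===== CLAIM (what is proved, stated in full; the proofs are below) =====
def Claim_equal_piece_danger_score : Prop := ∀ (piece : List Int) (board : List (Option (List Int))), Dom_piece_danger_score piece board → Pre_piece_danger_score piece board → Spec_piece_danger_score piece board (piece_danger_score piece board)

-- ===== LEMMAS AND PROOFS =====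

def lineA (board : List (Option (List Int))) (L : List Nat) : Bool :=
  !((L.map (pvCell board)).contains none) && hasCommonAttribute (L.map (pvCell board))

def ALines : List (List Nat) :=
  [[0,1,2,3],[0,4,8,12],[4,5,6,7],[1,5,9,13],[8,9,10,11],[2,6,10,14],
   [12,13,14,15],[3,7,11,15],[0,5,10,15],[3,6,9,12]]

theorem checkWinner_eq (board : List (Option (List Int))) (h : board.length = 16) :
    checkWinner board = ALines.any (lineA board) := by
  rcases board with _|⟨b0,board⟩; · simp at h
  rcases board with _|⟨b1,board⟩; · simp at h
  rcases board with _|⟨b2,board⟩; · simp at h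
  rcases board with _|⟨b3,board⟩; · simp at h
  rcases board with _|⟨b4,board⟩; · simp at h
  rcases board with _|⟨b5,board⟩; · simp at h
  rcases board with _|⟨b6,board⟩; · simp at h
  rcases board with _|⟨b7,board⟩; · simp at h
  rcases board with _|⟨b8,board⟩; · simp at h
  rcases board with _|⟨b9,board⟩; · simp at h
  rcases board with _|⟨b10,board⟩; · simp at h
  rcases board with _|⟨b11,board⟩; · simp at h
  rcases board with _|⟨b12,board⟩; · simp at h
  rcases board with _|⟨b13,board⟩; · simp at h
  rcases board with _|⟨b14,board⟩; · simp at h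
  rcases board with _|⟨b15,board⟩; · simp at h
  rcases board with _|⟨b16,board⟩
  · have e : checkWinner [b0,b1,b2,b3,b4,b5,b6,b7,b8,b9,b10,b11,b12,b13,b14,b15] =
      (((lineA [b0,b1,b2,b3,b4,b5,b6,b7,b8,b9,b10,b11,b12,b13,b14,b15] [0,1,2,3]
        || lineA [b0,b1,b2,b3,b4,b5,b6,b7,b8,b9,b10,b11,b12,b13,b14,b15] [0,4,8,12])
      || ((lineA [b0,b1,b2,b3,b4,b5,b6,b7,b8,b9,b10,b11,b12,b13,b14,b15] [4,5,6,7]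
        || lineA [b0,b1,b2,b3,b4,b5,b6,b7,b8,b9,b10,b11,b12,b13,b14,b15] [1,5,9,13])
      || ((lineA [b0,b1,b2,b3,b4,b5,b6,b7,b8,b9,b10,b11,b12,b13,b14,b15] [8,9,10,11]
        || lineA [b0,b1,b2,b3,b4,b5,b6,b7,b8,b9,b10,b11,b12,b13,b14,b15] [2,6,10,14])
      || ((lineA [b0,b1,b2,b3,b4,b5,b6,b7,b8,b9,b10,b11,b12,b13,b14,b15] [12,13,14,15]
        || lineA [b0,b1,b2,b3,b4,b5,b6,b7,b8,b9,b10,b11,b12,b13,b14,b15] [3,7,11,15])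
      || false))))
      || (lineA [b0,b1,b2,b3,b4,b5,b6,b7,b8,b9,b10,b11,b12,b13,b14,b15] [0,5,10,15]
        || lineA [b0,b1,b2,b3,b4,b5,b6,b7,b8,b9,b10,b11,b12,b13,b14,b15] [3,6,9,12])) := rfl
    rw [e]
    simp [ALines, Bool.or_assoc]
  · simp at h

theorem core4 (w x y z : Option Int) :
    ((PySem.Set.ofList [w, x, y, z]).length = 1) ↔ (x = w ∧ y = w ∧ z = w) := by
  constructor
  · intro h
    obtain ⟨a, ha⟩ := List.length_eq_one_iff.mp h
    have hw : w ∈ PySem.Set.ofList [w, x, y, z] := by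
      rw [PySem.Set.mem_ofList]; simp
    have hx : x ∈ PySem.Set.ofList [w, x, y, z] := by
      rw [PySem.Set.mem_ofList]; simp
    have hy : y ∈ PySem.Set.ofList [w, x, y, z] := by
      rw [PySem.Set.mem_ofList]; simp
    have hz : z ∈ PySem.Set.ofList [w, x, y, z] := by
      rw [PySem.Set.mem_ofList]; simp
    rw [ha] at hw hx hy hz
    simp at hw hx hy hz
    simp [hw, hx, hy, hz]
  · rintro ⟨rfl, rfl, rfl⟩
    have h4 : ∀ a : Option Int, PySem.Set.ofList [a, a, a, a] = [a] := fun a => by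
      simp [PySem.Set.ofList_cons, PySem.Set.ofList_nil, PySem.Set.discard]
    rw [h4]
    rfl

theorem hasCommon4 (p q r s : List Int) :
    hasCommonAttribute [some p, some q, some r, some s]
      = (List.range 4).any (fun i =>
          (PySem.List.pyGet? q (i : Int) == PySem.List.pyGet? p (i : Int))
          && ((PySem.List.pyGet? r (i : Int) == PySem.List.pyGet? p (i : Int))
          && (PySem.List.pyGet? s (i : Int) == PySem.List.pyGet? p (i : Int)))) := by
  rw [hasCommonAttribute]
  simp only [if_neg (by simp : ¬([some p, some q, some r, some s] = ([] : List (Option (List Int)))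
      ∨ [some p, some q, some r, some s].contains none))]
  refine PySem.List.any_congr_mem (fun i _ => ?_)
  simp only [List.map_cons, List.map_nil, Option.getD_some]
  rw [Bool.eq_iff_iff]
  simp only [beq_iff_eq, Bool.and_eq_true]
  exact core4 _ _ _ _

theorem shares_slot0 (p x y z : List Int) :
    hasCommonAttribute [some p, some x, some y, some z] = pvSharesAttribute p [x, y, z] := by
  rw [hasCommon4, pvSharesAttribute]
  refine PySem.List.any_congr_mem (fun i _ => ?_)
  rw [Bool.eq_iff_iff]
  simp only [List.all_cons, List.all_nil, Bool.and_true, beq_iff_eq, Bool.and_eq_true]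
theorem shares_slot1 (p x y z : List Int) :
    hasCommonAttribute [some x, some p, some y, some z] = pvSharesAttribute p [x, y, z] := by
  rw [hasCommon4, pvSharesAttribute]
  refine PySem.List.any_congr_mem (fun i _ => ?_)
  rw [Bool.eq_iff_iff]
  simp only [List.all_cons, List.all_nil, Bool.and_true, beq_iff_eq, Bool.and_eq_true]
  all_goals constructor <;> rintro ⟨h1, h2, h3⟩ <;> refine ⟨?_, ?_, ?_⟩ <;> simp_all
theorem shares_slot2 (p x y z : List Int) :
    hasCommonAttribute [some x, some y, some p, some z] = pvSharesAttribute p [x, y, z] := by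
  rw [hasCommon4, pvSharesAttribute]
  refine PySem.List.any_congr_mem (fun i _ => ?_)
  rw [Bool.eq_iff_iff]
  simp only [List.all_cons, List.all_nil, Bool.and_true, beq_iff_eq, Bool.and_eq_true]
  all_goals constructor <;> rintro ⟨h1, h2, h3⟩ <;> refine ⟨?_, ?_, ?_⟩ <;> simp_all
theorem shares_slot3 (p x y z : List Int) :
    hasCommonAttribute [some x, some y, some z, some p] = pvSharesAttribute p [x, y, z] := by
  rw [hasCommon4, pvSharesAttribute]
  refine PySem.List.any_congr_mem (fun i _ => ?_)
  rw [Bool.eq_iff_iff]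
  simp only [List.all_cons, List.all_nil, Bool.and_true, beq_iff_eq, Bool.and_eq_true]
  all_goals constructor <;> rintro ⟨h1, h2, h3⟩ <;> refine ⟨?_, ?_, ?_⟩ <;> simp_all

theorem pvCell_set_self (board : List (Option (List Int))) (pos : Nat) (v : Option (List Int))
    (h : pos < board.length) : pvCell (board.set pos v) pos = v := by
  simp [pvCell, List.getElem?_set_self h]
theorem pvCell_set_ne (board : List (Option (List Int))) (pos i : Nat) (v : Option (List Int))
    (h : i ≠ pos) : pvCell (board.set pos v) i = pvCell board i := by
  simp [pvCell, List.getElem?_set_ne (Ne.symm h)]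
theorem lineA_set_not_mem (board : List (Option (List Int))) (piece : List Int) (pos : Nat)
    (L : List Nat) (h : pos ∉ L) :
    lineA (board.set pos (some piece)) L = lineA board L := by
  have hm : L.map (pvCell (board.set pos (some piece))) = L.map (pvCell board) :=
    List.map_congr_left (fun i hi => pvCell_set_ne board pos i _ (fun e => h (e ▸ hi)))
  rw [lineA, lineA, hm]

theorem lineA_set_mem (board : List (Option (List Int))) (piece : List Int)
    (i j k l pos : Nat) (hnd : ([i, j, k, l] : List Nat).Nodup)
    (hmem : pos ∈ ([i, j, k, l] : List Nat)) (hlt : pos < board.length)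
    (hnone : pvCell board pos = none) :
    lineA (board.set pos (some piece)) [i, j, k, l]
      = (([i, j, k, l].filter (fun t => pvCell board t == none) == [pos])
         && pvSharesAttribute piece
              (([i, j, k, l].filter (fun t => !(pvCell board t == none))).map
                (fun t => (pvCell board t).getD []))) := by
  simp only [List.nodup_cons, List.mem_cons, List.not_mem_nil, or_false, not_or,
    List.nodup_nil, and_true] at hnd
  obtain ⟨⟨hij, hik, hil⟩, ⟨hjk, hjl⟩, hkl, -⟩ := hnd
  simp only [List.mem_cons, List.not_mem_nil, or_false] at hmem
  rcases hmem with rfl | rfl | rfl | rfl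
  · have hcj := pvCell_set_ne board pos j (some piece) (Ne.symm hij)
    have hck := pvCell_set_ne board pos k (some piece) (Ne.symm hik)
    have hcl := pvCell_set_ne board pos l (some piece) (Ne.symm hil)
    have hci := pvCell_set_self board pos (some piece) hlt
    rcases hj : pvCell board j with _ | pj <;> rcases hk' : pvCell board k with _ | pk <;>
      rcases hl' : pvCell board l with _ | pl <;>
      simp [lineA, hci, hcj, hck, hcl, hj, hk', hl', hnone, shares_slot0]
  · have hci := pvCell_set_ne board pos i (some piece) hij
    have hck := pvCell_set_ne board pos k (some piece) (Ne.symm hjk)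
    have hcl := pvCell_set_ne board pos l (some piece) (Ne.symm hjl)
    have hcj := pvCell_set_self board pos (some piece) hlt
    rcases hi : pvCell board i with _ | pi <;> rcases hk' : pvCell board k with _ | pk <;>
      rcases hl' : pvCell board l with _ | pl <;>
      simp [lineA, hci, hcj, hck, hcl, hi, hk', hl', hnone, shares_slot1]
  · have hci := pvCell_set_ne board pos i (some piece) hik
    have hcj := pvCell_set_ne board pos j (some piece) hjk
    have hcl := pvCell_set_ne board pos l (some piece) (Ne.symm hkl)
    have hck := pvCell_set_self board pos (some piece) hlt
    rcases hi : pvCell board i with _ | pi <;> rcases hj' : pvCell board j with _ | pj <;>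
      rcases hl' : pvCell board l with _ | pl <;>
      simp [lineA, hci, hcj, hck, hcl, hi, hj', hl', hnone, shares_slot2]
  · have hci := pvCell_set_ne board pos i (some piece) hil
    have hcj := pvCell_set_ne board pos j (some piece) hjl
    have hck := pvCell_set_ne board pos k (some piece) hkl
    have hcl := pvCell_set_self board pos (some piece) hlt
    rcases hi : pvCell board i with _ | pi <;> rcases hj' : pvCell board j with _ | pj <;>
      rcases hk' : pvCell board k with _ | pk <;>
      simp [lineA, hci, hcj, hck, hcl, hi, hj', hk', hnone, shares_slot3]

theorem lineA_set_mem' (board : List (Option (List Int))) (piece : List Int)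
    (L : List Nat) (pos : Nat) (hL : L ∈ ALines) (hmem : pos ∈ L)
    (hlt : pos < board.length) (hnone : pvCell board pos = none) :
    lineA (board.set pos (some piece)) L
      = ((L.filter (fun t => pvCell board t == none) == [pos])
         && pvSharesAttribute piece
              ((L.filter (fun t => !(pvCell board t == none))).map
                (fun t => (pvCell board t).getD []))) := by
  fin_cases hL <;> exact lineA_set_mem board piece _ _ _ _ pos (by decide) hmem hlt hnone

theorem alreadyLine_eq (board : List (Option (List Int))) (i j k l : Nat) :
    (([i, j, k, l] : List Nat).all (fun t => !(pvCell board t == none))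
      && pvSharesAttribute ((pvCell board (([i, j, k, l] : List Nat).headD 0)).getD [])
           (([i, j, k, l] : List Nat).map (fun t => (pvCell board t).getD [])))
    = lineA board [i, j, k, l] := by
  rcases hi : pvCell board i with _ | pi <;> rcases hj : pvCell board j with _ | pj <;>
    rcases hk : pvCell board k with _ | pk <;> rcases hl : pvCell board l with _ | pl <;>
    simp [lineA, hi, hj, hk, hl, shares_slot0, pvSharesAttribute]

theorem alreadyLine_eq' (board : List (Option (List Int))) (L : List Nat)
    (hL : L ∈ pvWinLines) :
    (L.all (fun t => !(pvCell board t == none))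
      && pvSharesAttribute ((pvCell board (L.headD 0)).getD [])
           (L.map (fun t => (pvCell board t).getD [])))
    = lineA board L := by
  fin_cases hL <;> exact alreadyLine_eq board _ _ _ _

theorem already_eq (board : List (Option (List Int))) :
    (pvWinLines.any (fun line =>
        line.all (fun i => !(pvCell board i == none))
          && pvSharesAttribute ((pvCell board (line.headD 0)).getD [])
               (line.map (fun i => (pvCell board i).getD []))))
    = ALines.any (lineA board) := by
  have hA : ∀ L ∈ pvWinLines, L ∈ ALines := by decide
  have hB : ∀ L ∈ ALines, L ∈ pvWinLines := by decide
  rw [Bool.eq_iff_iff, List.any_eq_true, List.any_eq_true]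
  constructor
  · rintro ⟨L, hL, h⟩
    exact ⟨L, hA L hL, (alreadyLine_eq' board L hL) ▸ h⟩
  · rintro ⟨L, hL, h⟩
    refine ⟨L, hB L hL, ?_⟩
    rw [alreadyLine_eq' board L (hB L hL)]
    exact h

theorem mem_lines_lt (L : List Nat) (t : Nat) (hL : L ∈ ALines) (ht : t ∈ L) : t < 16 := by
  fin_cases hL <;> simp at ht <;> omega

def stepW (piece : List Int) (board : List (Option (List Int)))
    (s : PySem.Set Nat) (line : List Nat) : PySem.Set Nat :=
  let holes := line.filter (fun i => pvCell board i == none)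
  if holes.length == 1 then
    let filled := (line.filter (fun i => !(pvCell board i == none))).map
      (fun i => (pvCell board i).getD [])
    if pvSharesAttribute piece filled then PySem.Set.add s (holes.headD 0) else s
  else s

theorem mem_foldl_stepW (piece : List Int) (board : List (Option (List Int)))
    (lines : List (List Nat)) (s : PySem.Set Nat) (x : Nat) :
    x ∈ lines.foldl (stepW piece board) s
      ↔ x ∈ s ∨ ∃ L ∈ lines,
          ((L.filter (fun i => pvCell board i == none)).length == 1) = true ∧
          pvSharesAttribute piece ((L.filter (fun i => !(pvCell board i == none))).map
            (fun i => (pvCell board i).getD [])) = true ∧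
          x = (L.filter (fun i => pvCell board i == none)).headD 0 := by
  induction lines generalizing s with
  | nil => simp
  | cons L ls ih =>
    rw [List.foldl_cons, ih, List.exists_mem_cons_iff]
    dsimp only [stepW]
    split
    · split
      · rw [PySem.Set.mem_add]; tauto
      · tauto
    · tauto

theorem nodup_foldl_stepW (piece : List Int) (board : List (Option (List Int)))
    (lines : List (List Nat)) (s : PySem.Set Nat) (h : s.Nodup) :
    (lines.foldl (stepW piece board) s).Nodup := by
  induction lines generalizing s with
  | nil => exact h
  | cons L ls ih =>
    rw [List.foldl_cons]
    refine ih _ ?_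
    dsimp only [stepW]
    split
    · split
      · exact PySem.Set.nodup_add _ _ h
      · exact h
    · exact h

theorem foldl_score (f : Int → Bool) (l : List Int) (a : Int) :
    l.foldl (fun s pos => if f pos then s + 100 else s) a = a + 100 * (l.countP f : Int) := by
  induction l generalizing a with
  | nil => simp
  | cons x xs ih =>
    rw [List.foldl_cons]
    cases hf : f x <;> simp only [if_true, ih, List.countP_cons, hf] <;>
      push_cast <;> ring

def emptiesOf (board : List (Option (List Int))) : List Int :=
  ((PySem.List.enumerate board).filter (fun ip => ip.2 == none)).map (fun ip => ip.1)

theorem pvCell_eq_getElem (board : List (Option (List Int))) (k : Nat) (h : k < board.length) :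
    pvCell board k = board[k] := by
  simp [pvCell, List.getElem?_eq_getElem h]

theorem mem_emptiesOf (board : List (Option (List Int))) (x : Int) :
    x ∈ emptiesOf board ↔ ∃ k : Nat, k < board.length ∧ x = (k : Int) ∧ pvCell board k = none := by
  simp only [emptiesOf, List.mem_map, List.mem_filter, PySem.List.mem_enumerate_iff]
  constructor
  · rintro ⟨ip, ⟨⟨k, hk, rfl⟩, h2⟩, rfl⟩
    refine ⟨k, hk, by simp, ?_⟩
    rw [pvCell_eq_getElem board k hk]
    simpa using h2
  · rintro ⟨k, hk, rfl, hnone⟩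
    refine ⟨((k : Int), board[k]), ⟨⟨k, hk, by simp⟩, ?_⟩, rfl⟩
    rw [pvCell_eq_getElem board k hk] at hnone
    simp [hnone]
theorem nodup_emptiesOf (board : List (Option (List Int))) : (emptiesOf board).Nodup := by
  have h1 := PySem.List.pairwise_lt_enumerate (xs := board) (s := 0)
  have h2 := h1.filter (fun ip => ip.2 == none)
  have h3 : ((((PySem.List.enumerate board 0).filter (fun ip => ip.2 == none)).map
      (fun ip => ip.1)) : List Int).Pairwise (· < ·) := List.pairwise_map.mpr h2
  exact h3.imp ne_of_lt

theorem filter_singleton_iff (l : List Nat) (k : Nat) :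
    l = [k] ↔ (l.length = 1 ∧ l.headD 0 = k) := by
  constructor
  · rintro rfl; exact ⟨rfl, rfl⟩
  · rintro ⟨h1, h2⟩
    obtain ⟨a, rfl⟩ := List.length_eq_one_iff.mp h1
    simpa using h2

theorem mem_W_iff (piece : List Int) (board : List (Option (List Int))) (n : Nat) :
    n ∈ pvWinLines.foldl (stepW piece board) PySem.Set.empty
      ↔ ∃ L ∈ ALines, L.filter (fun t => pvCell board t == none) = [n] ∧
          pvSharesAttribute piece ((L.filter (fun t => !(pvCell board t == none))).map
            (fun t => (pvCell board t).getD [])) = true := by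
  have hA : ∀ L ∈ pvWinLines, L ∈ ALines := by decide
  have hB : ∀ L ∈ ALines, L ∈ pvWinLines := by decide
  rw [mem_foldl_stepW]
  rw [show (PySem.Set.empty : PySem.Set Nat) = [] from rfl]
  simp only [List.not_mem_nil, false_or]
  constructor
  · rintro ⟨L, hL, h1, h2, h3⟩
    refine ⟨L, hA L hL, ?_, h2⟩
    rw [filter_singleton_iff]
    exact ⟨by simpa using h1, h3.symm⟩
  · rintro ⟨L, hL, hfil, h2⟩
    obtain ⟨hl1, hh⟩ := (filter_singleton_iff _ _).mp hfil
    exact ⟨L, hB L hL, by simpa using hl1, h2, hh.symm⟩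

theorem checkWinner_set_iff (piece : List Int) (board : List (Option (List Int)))
    (hlen : board.length = 16) (hAllF : ∀ L ∈ ALines, lineA board L = false) (k : Nat)
    (hk : k < board.length) (hnone : pvCell board k = none) :
    checkWinner (board.set k (some piece)) = true
      ↔ ∃ L ∈ ALines, L.filter (fun t => pvCell board t == none) = [k] ∧
          pvSharesAttribute piece ((L.filter (fun t => !(pvCell board t == none))).map
            (fun t => (pvCell board t).getD [])) = true := by
  rw [checkWinner_eq _ (by simpa using hlen), List.any_eq_true]
  constructor
  · rintro ⟨L, hL, htrue⟩
    by_cases hkL : k ∈ L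
    · rw [lineA_set_mem' board piece L k hL hkL hk hnone] at htrue
      rw [Bool.and_eq_true, beq_iff_eq] at htrue
      exact ⟨L, hL, htrue.1, htrue.2⟩
    · rw [lineA_set_not_mem board piece k L hkL, hAllF L hL] at htrue
      exact absurd htrue (by simp)
  · rintro ⟨L, hL, h1, h2⟩
    have hkL : k ∈ L := by
      have hkm : k ∈ L.filter (fun t => pvCell board t == none) := by rw [h1]; simp
      exact (List.mem_filter.mp hkm).1
    refine ⟨L, hL, ?_⟩
    rw [lineA_set_mem' board piece L k hL hkL hk hnone]
    rw [Bool.and_eq_true, beq_iff_eq]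
    exact ⟨h1, h2⟩

theorem a_eq_count (piece : List Int) (board : List (Option (List Int))) :
    piece_danger_score piece board
      = 100 * (((emptiesOf board).countP
          (fun pos => checkWinner (PySem.List.pySetD board pos (some piece)))) : Int) := by
  show (PySem.List.sorted (emptiesOf board)
      (fun x => -(PySem.List.pyGetD ((List.range 16).map (fun i =>
        if i ∈ ([5, 6, 9, 10] : List Nat) then (3 : Int)
        else if i ∈ ([0, 3, 12, 15] : List Nat) then 2 else 1)) x 0)) false).foldl
      (fun s pos => if (fun pos => checkWinner (PySem.List.pySetD board pos (some piece))) pos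
        then s + 100 else s) 0 = _
  rw [foldl_score]
  rw [(PySem.List.sorted_perm (emptiesOf board)
      (fun x => -(PySem.List.pyGetD ((List.range 16).map (fun i =>
        if i ∈ ([5, 6, 9, 10] : List Nat) then (3 : Int)
        else if i ∈ ([0, 3, 12, 15] : List Nat) then 2 else 1)) x 0)) false).countP_eq]
  exact zero_add _

theorem alt_of_empties_nil (piece : List Int) (board : List (Option (List Int)))
    (hE : emptiesOf board = []) : piece_danger_score_alt piece board = 0 := by
  show (if (emptiesOf board).isEmpty then (0 : Int) else _) = 0
  rw [hE]
  rfl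

theorem emptiesOf_nil (board : List (Option (List Int)))
    (h : board.contains none = false) : emptiesOf board = [] := by
  rw [emptiesOf, List.map_eq_nil_iff, List.filter_eq_nil_iff]
  intro ip hip
  rw [PySem.List.mem_enumerate_iff] at hip
  obtain ⟨k, hk, rfl⟩ := hip
  have hnm : (none : Option (List Int)) ∉ board := by simpa using h
  simp only [beq_iff_eq]
  intro heq
  exact hnm (heq ▸ board.getElem_mem hk)

theorem main_equiv (piece : List Int) (board : List (Option (List Int)))
    (hlen : board.length = 16) (hE : emptiesOf board ≠ []) :
    piece_danger_score piece board = piece_danger_score_alt piece board := by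
  have hA := a_eq_count piece board
  have hE' : (emptiesOf board).isEmpty = false := by
    simpa [List.isEmpty_iff] using hE
  cases hAL : ALines.any (lineA board)
  · -- the board has no completed winning line
    have hAllF : ∀ L ∈ ALines, lineA board L = false := by
      intro L hL
      simpa using List.any_eq_false.mp hAL L hL
    have hB : piece_danger_score_alt piece board
        = 100 * ((pvWinLines.foldl (stepW piece board) PySem.Set.empty).length : Int) := by
      show (if (emptiesOf board).isEmpty then (0 : Int)
          else if (pvWinLines.any (fun line =>
            line.all (fun i => !(pvCell board i == none))
              && pvSharesAttribute ((pvCell board (line.headD 0)).getD [])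
                   (line.map (fun i => (pvCell board i).getD []))))
          then 100 * ((emptiesOf board).length : Int)
          else 100 * ((pvWinLines.foldl (stepW piece board) PySem.Set.empty).length : Int)) = _
      rw [hE', already_eq board, hAL]
      simp
    rw [hA, hB]
    have hcount : (emptiesOf board).countP
        (fun pos => checkWinner (PySem.List.pySetD board pos (some piece)))
        = (pvWinLines.foldl (stepW piece board) PySem.Set.empty).length := by
      rw [List.countP_eq_length_filter]
      have hmem2 : ∀ x : Int,
          x ∈ (emptiesOf board).filter
            (fun pos => checkWinner (PySem.List.pySetD board pos (some piece)))
          ↔ x ∈ (pvWinLines.foldl (stepW piece board) PySem.Set.empty).map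
              (fun n : Nat => (n : Int)) := by
        intro x
        rw [List.mem_filter, mem_emptiesOf, List.mem_map]
        constructor
        · rintro ⟨⟨k, hk, rfl, hnone⟩, hcw⟩
          refine ⟨k, ?_, rfl⟩
          rw [mem_W_iff]
          rw [PySem.List.pySetD_natCast] at hcw
          exact (checkWinner_set_iff piece board hlen hAllF k hk hnone).mp hcw
        · rintro ⟨n, hn, rfl⟩
          rw [mem_W_iff] at hn
          obtain ⟨L, hL, hfil, hsh⟩ := hn
          have hnf : n ∈ L.filter (fun t => pvCell board t == none) := by rw [hfil]; simp
          have hnL : n ∈ L := (List.mem_filter.mp hnf).1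
          have hnlt : n < board.length := by rw [hlen]; exact mem_lines_lt L n hL hnL
          have hnone : pvCell board n = none := by
            have h2 := (List.mem_filter.mp hnf).2
            simpa using h2
          refine ⟨⟨n, hnlt, rfl, hnone⟩, ?_⟩
          rw [PySem.List.pySetD_natCast]
          exact (checkWinner_set_iff piece board hlen hAllF n hnlt hnone).mpr ⟨L, hL, hfil, hsh⟩
      have hperm2 := (List.perm_ext_iff_of_nodup
          ((nodup_emptiesOf board).filter _)
          (List.Nodup.map (fun a b h => by exact_mod_cast h)
            (nodup_foldl_stepW piece board pvWinLines PySem.Set.empty (by simp [PySem.Set.empty])))).mpr hmem2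
      rw [hperm2.length_eq, List.length_map]
    rw [hcount]
  · -- the board already contains a winning line: every empty cell wins
    have hB : piece_danger_score_alt piece board = 100 * ((emptiesOf board).length : Int) := by
      show (if (emptiesOf board).isEmpty then (0 : Int)
          else if (pvWinLines.any (fun line =>
            line.all (fun i => !(pvCell board i == none))
              && pvSharesAttribute ((pvCell board (line.headD 0)).getD [])
                   (line.map (fun i => (pvCell board i).getD []))))
          then 100 * ((emptiesOf board).length : Int)
          else 100 * ((pvWinLines.foldl (stepW piece board) PySem.Set.empty).length : Int)) = _
      rw [hE', already_eq board, hAL]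
      simp
    rw [hA, hB]
    have hall : (emptiesOf board).countP
        (fun pos => checkWinner (PySem.List.pySetD board pos (some piece)))
        = (emptiesOf board).length := by
      refine List.countP_eq_length.mpr ?_
      intro x hx
      obtain ⟨k, hk, rfl, hnone⟩ := (mem_emptiesOf board x).mp hx
      obtain ⟨L₀, hL₀, hTrue⟩ := List.any_eq_true.mp hAL
      have hkL : k ∉ L₀ := by
        intro hkL
        rw [lineA, Bool.and_eq_true] at hTrue
        have hnc : ¬ ((none : Option (List Int)) ∈ L₀.map (pvCell board)) := by
          simpa using hTrue.1
        exact hnc (List.mem_map.mpr ⟨k, hkL, hnone⟩)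
      show checkWinner (PySem.List.pySetD board ((k : Nat) : Int) (some piece)) = true
      rw [PySem.List.pySetD_natCast, checkWinner_eq _ (by simpa using hlen), List.any_eq_true]
      exact ⟨L₀, hL₀, by rw [lineA_set_not_mem board piece k L₀ hkL]; exact hTrue⟩
    rw [hall]

-- ===== VERDICT (by name: the statement is the Claim_ definition above) =====
theorem piece_danger_score_spec : Claim_equal_piece_danger_score := by
  intro piece board _ hpre
  unfold Spec_piece_danger_score
  by_cases hE : emptiesOf board = []
  · rw [alt_of_empties_nil piece board hE, a_eq_count piece board, hE]
    simp
  · have hlen : board.length = 16 := by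
      rcases hpre with hfull | ⟨hlen, -, -⟩
      · exact absurd (emptiesOf_nil board hfull) hE
      · exact hlen
    exact main_equiv piece board hlen hE
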